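-- pv_equiv track=rewrite | github.com/TrentPierce/GradientDetachment | src/ctdma/theory/topology.py | morse_inequalities_check
-- ===== SOURCE A (Python) =====
-- from typing import Dict, List, Tuple, Callable, Optional
--
-- def morse_inequalities_check(
--     critical_point_counts: Dict[str, int],
--     betti_numbers: List[int]
-- ) -> bool:
--     """
--     Verify Morse inequalities hold.
--
--     Args:
--         critical_point_counts: Counts by Morse index
--         betti_numbers: Topological Betti numbers
--
--     Returns:
--         Whether inequalities are satisfied
--     """
--     # Extract counts
--     M = [critical_point_counts.get(f'index_{k}', 0)
--          for k in range(len(betti_numbers))]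
--     b = betti_numbers
--
--     # Check alternating sum inequality
--     for k in range(len(M)):
--         alternating_M = sum((-1)**(k-i) * M[i] for i in range(k+1))
--         alternating_b = sum((-1)**(k-i) * b[i] for i in range(k+1))
--
--         if alternating_M < alternating_b:
--             return False
--
--     return True
-- ===== SOURCE B (Python) =====
-- def morse_inequalities_check(critical_point_counts, betti_numbers):
--     # Single pass: the alternating sum obeys s_k = x_k - s_{k-1}.
--     alt_M = 0
--     alt_b = 0
--     for k, b_k in enumerate(betti_numbers):
--         alt_M = critical_point_counts.get(f'index_{k}', 0) - alt_M
--         alt_b = b_k - alt_b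
--         if alt_M < alt_b:
--             return False
--     return True
-- ===== Notes on version B (the rewrite author's own statement) =====
-- stated objective: faster
-- what changed: Replaces the per-index recomputation of each alternating prefix sum with a single pass maintaining both alternating sums via the recurrence s_k = x_k - s_{k-1} (O(n) vs O(n^2)); a timing run measured B 2.6x faster at the largest size.
import Mathlib
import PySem

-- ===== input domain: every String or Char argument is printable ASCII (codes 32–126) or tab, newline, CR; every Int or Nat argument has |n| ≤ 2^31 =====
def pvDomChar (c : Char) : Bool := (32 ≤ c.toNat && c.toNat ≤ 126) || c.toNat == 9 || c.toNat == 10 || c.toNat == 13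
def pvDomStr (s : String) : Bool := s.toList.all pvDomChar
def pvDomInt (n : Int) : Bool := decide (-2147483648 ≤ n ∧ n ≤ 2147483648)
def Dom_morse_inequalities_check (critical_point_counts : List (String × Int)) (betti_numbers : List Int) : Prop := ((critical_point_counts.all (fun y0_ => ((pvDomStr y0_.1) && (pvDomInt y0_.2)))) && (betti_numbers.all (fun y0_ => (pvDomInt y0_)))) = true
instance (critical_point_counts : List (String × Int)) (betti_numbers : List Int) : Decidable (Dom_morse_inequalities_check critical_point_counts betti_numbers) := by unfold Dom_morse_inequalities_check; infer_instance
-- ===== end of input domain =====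

-- B changes the algorithm: one pass maintaining both alternating sums via the recurrence
-- s_k = x_k - s_{k-1}, instead of A's recomputation of each alternating prefix sum at every index.

-- the key f'index_{k}' (used by both Pythons)
def pvKey (k : Int) : String := "index_" ++ PySem.Int.toStr k

-- ===== PORT A =====
def morse_inequalities_check (critical_point_counts : List (String × Int)) (betti_numbers : List Int) : Bool :=
  let M : List Int := (PySem.List.pyRange 0 (PySem.List.len betti_numbers) 1).map
      (fun k => ((critical_point_counts.lookup (pvKey k)).getD 0))
  (PySem.List.pyRange 0 (PySem.List.len M) 1).all (fun k =>
    let alternating_M := ((PySem.List.pyRange 0 (k + 1) 1).map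
        (fun i => (-1 : Int) ^ (k - i).toNat * PySem.List.pyGetD M i 0)).sum
    let alternating_b := ((PySem.List.pyRange 0 (k + 1) 1).map
        (fun i => (-1 : Int) ^ (k - i).toNat * PySem.List.pyGetD betti_numbers i 0)).sum
    !(decide (alternating_M < alternating_b)))

-- ===== PORT B =====
def pvAltLoop (critical_point_counts : List (String × Int)) :
    List Int → Int → Int → Int → Bool
  | [], _, _, _ => true
  | b_k :: rest, k, alt_M, alt_b =>
    let alt_M' := ((critical_point_counts.lookup (pvKey k)).getD 0) - alt_M
    let alt_b' := b_k - alt_b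
    if alt_M' < alt_b' then false
    else pvAltLoop critical_point_counts rest (k + 1) alt_M' alt_b'

def morse_inequalities_check_alt (critical_point_counts : List (String × Int)) (betti_numbers : List Int) : Bool :=
  pvAltLoop critical_point_counts betti_numbers 0 0 0

-- ===== PRECONDITION & SPEC =====
def Spec_morse_inequalities_check (critical_point_counts : List (String × Int)) (betti_numbers : List Int) (out : Bool) : Prop := out = morse_inequalities_check_alt critical_point_counts betti_numbers
instance (critical_point_counts : List (String × Int)) (betti_numbers : List Int) (out : Bool) : Decidable (Spec_morse_inequalities_check critical_point_counts betti_numbers out) := by unfold Spec_morse_inequalities_check; infer_instance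

-- ===== CLAIM (what is proved, stated in full; the proofs are below) =====
def Claim_equal_morse_inequalities_check : Prop := ∀ (critical_point_counts : List (String × Int)) (betti_numbers : List Int), Dom_morse_inequalities_check critical_point_counts betti_numbers → Spec_morse_inequalities_check critical_point_counts betti_numbers (morse_inequalities_check critical_point_counts betti_numbers)

-- ===== LEMMAS AND PROOFS =====

-- alternating sum of f over indices < k (the accumulator of B's loop)
def pvAsum (f : Nat → Int) : Nat → Int
  | 0 => 0
  | k + 1 => f k - pvAsum f k

def pvM (cpc : List (String × Int)) (j : Nat) : Int :=
  ((cpc.lookup (pvKey (j : Int))).getD 0)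

lemma pvAll_congr {α : Type} (l : List α) (f g : α → Bool) (h : ∀ x, f x = g x) :
    l.all f = l.all g := by
  have : f = g := funext h
  rw [this]

lemma pvAll_congr_mem {α : Type} (l : List α) (f g : α → Bool) (h : ∀ x ∈ l, f x = g x) :
    l.all f = l.all g := by
  induction l with
  | nil => rfl
  | cons x t ih =>
    simp only [List.all_cons, h x (by simp), ih (fun y hy => h y (by simp [hy]))]

-- the explicit alternating prefix sum of A equals the recurrence value
lemma pvAsum_congr (f g : Nat → Int) (n : Nat) (h : ∀ j, j < n → f j = g j) :
    pvAsum f n = pvAsum g n := by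
  induction n with
  | zero => rfl
  | succ n ih =>
    simp only [pvAsum, h n (by omega), ih (fun j hj => h j (by omega))]

lemma pvSumInt_eq (f : Int → Int) (k : Nat) :
    ((PySem.List.pyRange 0 ((k : Int) + 1) 1).map
        (fun i => (-1 : Int) ^ ((k : Int) - i).toNat * f i)).sum
      = pvAsum (fun j => f (j : Int)) (k + 1) := by
  induction k with
  | zero =>
    rw [show ((0 : Nat) : Int) + 1 = 0 + 1 by norm_num, PySem.List.pyRange_one_singleton]
    simp [pvAsum]
  | succ k ih =>
    have hc : ((k + 1 : Nat) : Int) + 1 = ((k : Int) + 1) + 1 := by push_cast; ring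
    rw [hc, PySem.List.pyRange_one_succ_right (a := 0) (b := (k : Int) + 1) (by omega), List.map_append,
      List.sum_append]
    have htail : ((([((k : Int) + 1)]).map
        (fun i => (-1 : Int) ^ (((k + 1 : Nat) : Int) - i).toNat * f i)).sum) = f ((k : Int) + 1) := by
      norm_num
    have hhead : (PySem.List.pyRange 0 ((k : Int) + 1) 1).map
          (fun i => (-1 : Int) ^ (((k + 1 : Nat) : Int) - i).toNat * f i)
        = (PySem.List.pyRange 0 ((k : Int) + 1) 1).map
          (fun i => (-1 : Int) * ((-1 : Int) ^ ((k : Int) - i).toNat * f i)) := by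
      apply List.map_congr_left
      intro i hi
      have hmem := PySem.List.mem_pyRange_one.mp hi
      have : (((k + 1 : Nat) : Int) - i).toNat = ((k : Int) - i).toNat + 1 := by omega
      rw [this, pow_succ]
      ring
    rw [htail, hhead, List.sum_map_mul_left, ih]
    have : pvAsum (fun j => f (j : Int)) (k + 1 + 1)
        = f ((k + 1 : Nat) : Int) - pvAsum (fun j => f (j : Int)) (k + 1) := rfl
    rw [this]
    push_cast
    ring

lemma pvA_eq (cpc : List (String × Int)) (b : List Int) :
    morse_inequalities_check cpc b =
      (List.range b.length).all (fun k =>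
        !(decide (pvAsum (pvM cpc) (k + 1) < pvAsum (fun j => b.getD j 0) (k + 1)))) := by
  simp only [morse_inequalities_check]
  set M := (PySem.List.pyRange 0 (PySem.List.len b) 1).map (fun k => ((cpc.lookup (pvKey k)).getD 0)) with hMdef
  have hMlen : M.length = b.length := by
    simp [hMdef, PySem.List.length_pyRange_one, PySem.List.len_eq]
  rw [PySem.List.len_eq (xs := M), hMlen, PySem.List.pyRange_zero_natCast, List.all_map]
  apply pvAll_congr_mem
  intro k hk
  have hkb : k < b.length := by simpa using hk
  simp only [Function.comp]
  rw [pvSumInt_eq (fun i => PySem.List.pyGetD M i 0) k,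
    pvSumInt_eq (fun i => PySem.List.pyGetD b i 0) k]
  have hMside : pvAsum (fun j => PySem.List.pyGetD M ((j : Nat) : Int) 0) (k + 1)
      = pvAsum (pvM cpc) (k + 1) := by
    apply pvAsum_congr
    intro j hj
    rw [hMdef, PySem.List.len_eq, PySem.List.pyGetD_map_pyRange _ _ _ _ (by omega)]
    rfl
  have hbside : pvAsum (fun j => PySem.List.pyGetD b ((j : Nat) : Int) 0) (k + 1)
      = pvAsum (fun j => b.getD j 0) (k + 1) := by
    apply pvAsum_congr
    intro j hj
    simp [PySem.List.pyGetD_natCast]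
  rw [hMside, hbside]

lemma pvAltLoop_eq (cpc : List (String × Int)) (g : Nat → Int) :
    ∀ (bs : List Int) (k0 : Nat),
      (∀ j (hj : j < bs.length), bs[j] = g (k0 + j)) →
      pvAltLoop cpc bs (k0 : Int) (pvAsum (pvM cpc) k0) (pvAsum g k0) =
        (List.range bs.length).all (fun j =>
          !(decide (pvAsum (pvM cpc) (k0 + j + 1) < pvAsum g (k0 + j + 1)))) := by
  intro bs
  induction bs with
  | nil => intro k0 _; simp [pvAltLoop]
  | cons bk rest ih =>
    intro k0 hbs
    have hb0 : bk = g k0 := by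
      have := hbs 0 (by simp)
      simpa using this
    have hM : ((cpc.lookup (pvKey (k0 : Int))).getD 0) - pvAsum (pvM cpc) k0
        = pvAsum (pvM cpc) (k0 + 1) := by
      simp [pvAsum, pvM]
    have hB : bk - pvAsum g k0 = pvAsum g (k0 + 1) := by
      simp [pvAsum, hb0]
    rw [List.length_cons, List.range_succ_eq_map, List.all_cons, List.all_map]
    simp only [pvAltLoop, hM, hB]
    by_cases hlt : pvAsum (pvM cpc) (k0 + 1) < pvAsum g (k0 + 1)
    · simp [hlt]
    · have hrec : pvAltLoop cpc rest ((k0 : Int) + 1) (pvAsum (pvM cpc) (k0 + 1)) (pvAsum g (k0 + 1))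
          = (List.range rest.length).all (fun j =>
              !(decide (pvAsum (pvM cpc) ((k0 + 1) + j + 1) < pvAsum g ((k0 + 1) + j + 1)))) := by
        have hc : ((k0 : Int) + 1) = ((k0 + 1 : Nat) : Int) := by push_cast; ring
        rw [hc]
        exact ih (k0 + 1) (by
          intro j hj
          have := hbs (j + 1) (by simpa using Nat.succ_lt_succ hj)
          simpa [Nat.add_comm, Nat.add_assoc, Nat.add_left_comm] using this)
      rw [hrec]
      have harg : (fun j => !(decide (pvAsum (pvM cpc) ((k0 + 1) + j + 1) < pvAsum g ((k0 + 1) + j + 1))))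
          = (fun j => !(decide (pvAsum (pvM cpc) (k0 + (j + 1) + 1) < pvAsum g (k0 + (j + 1) + 1)))) := by
        funext j
        have h1 : (k0 + 1) + j + 1 = k0 + (j + 1) + 1 := by omega
        rw [h1]
      simp only [hlt, harg]
      apply pvAll_congr
      intro j
      simp [Function.comp]

-- ===== VERDICT (by name: the statement is the Claim_ definition above) =====
theorem morse_inequalities_check_spec : Claim_equal_morse_inequalities_check := by
  intro cpc b _
  unfold Spec_morse_inequalities_check morse_inequalities_check_alt
  have hloop := pvAltLoop_eq cpc (fun j => b.getD j 0) b 0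
      (by intro j hj; simp [List.getD_eq_getElem?_getD, hj])
  simp only [Nat.cast_zero, Nat.zero_add, pvAsum] at hloop
  rw [pvA_eq, hloop]
  apply pvAll_congr
  intro j
  simp [pvAsum]
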